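-- pv_equiv track=rewrite | github.com/Kang-Beom-Seo/Coding-Test | 05_DFS_BFS/Exercise18.py | correct_bracket
-- ===== SOURCE A (Python) =====
-- def split_bracket(brackets):
--     stack = []
--     stack.append(brackets[0])
--     u_idx = len(brackets)
--     if brackets[0] == '(':
--         insert_bracket = '('
--         delete_bracket = ')'
--     else:
--         insert_bracket = ')'
--         delete_bracket = '('
--     for i in range(1, len(brackets)):
--         if not stack:
--             u_idx = i
--             break
--         if brackets[i] == insert_bracket:
--             stack.append(brackets[i])
--         else:
--             stack.pop()
--     u = brackets[:u_idx]
--     v = brackets[u_idx:]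
--     return u, v
--
-- def check_valid_bracket(brackets):
--     if brackets == '':
--         return True
--     stack = []
--     stack.append(brackets[0])
--     if brackets[0] == ')':
--         return False
--     for i in range(1, len(brackets)):
--         if brackets[i] == '(':
--             stack.append('(')
--         else:
--             if not stack:
--                 return False
--             stack.pop()
--
--     return True
--
-- def correct_bracket(brackets):
--     answer = ''
--     if brackets == '':
--         return ''
--     u, v = split_bracket(brackets)
--     if check_valid_bracket(u):
--         answer += u
--         v = correct_bracket(v)
--         answer += v
--     else:
--         answer = '('
--         v = correct_bracket(v)
--         answer += v
--         answer += ')'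
--         u = u[1:-1]
--         temp = ''
--         for bracket in u:
--             if bracket == '(':
--                 temp += ')'
--             else:
--                 temp += '('
--         answer += temp
--
--     return answer
-- ===== SOURCE B (Python) =====
-- def _flush(pre, suf, seg, valid):
--     if valid:
--         pre.append(''.join(seg))
--     else:
--         pre.append('(')
--         suf.append(')' + ''.join(')' if ch == '(' else '(' for ch in seg[1:-1]))
--
--
-- def correct_bracket(brackets):
--     pre = []          # segment outputs, left to right
--     suf = []          # postponed closing parts, outermost first
--     seg = []          # current segment buffer
--     ins = '('
--     bal = 0           # split-balance of the current segment
--     valid = True      # incremental validity of the current segment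
--     g = 0             # open-paren counter for validity
--     for c in brackets:
--         if seg and bal == 0:
--             _flush(pre, suf, seg, valid)
--             seg = []
--         if not seg:
--             ins = '(' if c == '(' else ')'
--             bal = 1
--             valid = c != ')'
--             g = 1
--         else:
--             bal += 1 if c == ins else -1
--             if valid:
--                 if c == '(':
--                     g += 1
--                 elif g == 0:
--                     valid = False
--                 else:
--                     g -= 1
--         seg.append(c)
--     if seg:
--         _flush(pre, suf, seg, valid)
--     return ''.join(pre) + ''.join(reversed(suf))
-- ===== Notes on version B (the rewrite author's own statement) =====
-- stated objective: faster
-- what changed: Replaced A's recursive split/validate/recombine (with repeated string slicing and concatenation) by a single left-to-right pass state machine that detects segment boundaries with a balance counter and checks validity incrementally, assembling the answer from a prefix list and a reversed suffix list joined once at the end.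
import Mathlib
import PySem

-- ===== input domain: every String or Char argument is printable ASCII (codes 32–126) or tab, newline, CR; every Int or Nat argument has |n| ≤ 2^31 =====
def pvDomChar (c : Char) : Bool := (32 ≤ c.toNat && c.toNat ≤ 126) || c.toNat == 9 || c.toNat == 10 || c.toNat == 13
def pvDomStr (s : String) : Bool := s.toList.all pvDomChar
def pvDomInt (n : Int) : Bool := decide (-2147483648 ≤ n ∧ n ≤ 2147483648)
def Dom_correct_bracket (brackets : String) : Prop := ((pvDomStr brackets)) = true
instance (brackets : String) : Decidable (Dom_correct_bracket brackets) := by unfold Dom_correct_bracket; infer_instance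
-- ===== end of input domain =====

-- B replaces A's recursive split/validate/recombine by one left-to-right state-machine pass
-- with a balance counter and two output lists (objective: faster, asymptotically on segment-heavy inputs).

-- ===== PORT A =====
-- the `for i in range(1, len(brackets))` loop of split_bracket: returns u_idx
def splitLoopA (rest : List Char) (i : Nat) (ins : Char) (stack : List Char) : Nat :=
  match rest with
  | [] => i
  | c :: r =>
    if stack = [] then i
    else if c = ins then splitLoopA r (i+1) ins (c :: stack)
    else splitLoopA r (i+1) ins stack.tail

-- needed by correctA's termination proof
theorem splitLoopA_ge (rest : List Char) (i : Nat) (ins : Char) (stack : List Char) :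
    i ≤ splitLoopA rest i ins stack := by
  induction rest generalizing i stack with
  | nil => simp [splitLoopA]
  | cons c r ih =>
    simp only [splitLoopA]
    split
    · exact le_refl _
    · split
      · exact le_trans (Nat.le_succ i) (ih (i+1) _)
      · exact le_trans (Nat.le_succ i) (ih (i+1) _)

-- split_bracket's u_idx (u, v are taken by slicing at this index)
def splitIdxA (cs : List Char) : Nat :=
  match cs with
  | [] => 0
  | c0 :: r => splitLoopA r 1 (if c0 = '(' then '(' else ')') [c0]

-- the loop of check_valid_bracket
def checkLoopA (rest : List Char) (stack : List Char) : Bool :=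
  match rest with
  | [] => true
  | c :: r =>
    if c = '(' then checkLoopA r ('(' :: stack)
    else
      match stack with
      | [] => false
      | _ :: st => checkLoopA r st

def checkValidA (cs : List Char) : Bool :=
  match cs with
  | [] => true
  | c0 :: r => if c0 = ')' then false else checkLoopA r [c0]

-- the `temp` loop of correct_bracket (flip each bracket)
def flipA (xs : List Char) : List Char :=
  match xs with
  | [] => []
  | c :: r => (if c = '(' then ')' else '(') :: flipA r

def correctA (cs : List Char) : List Char :=
  match cs with
  | [] => []
  | c0 :: r =>
    let k := splitIdxA (c0 :: r)
    let u := (c0 :: r).take k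
    let v := (c0 :: r).drop k
    if checkValidA u then u ++ correctA v
    else ('(' :: correctA v) ++ ')' :: flipA ((u.drop 1).dropLast)
termination_by cs.length
decreasing_by
  all_goals
    simp only [List.length_drop, List.length_cons, splitIdxA]
    have h := splitLoopA_ge r 1 (if c0 = '(' then '(' else ')') [c0]
    omega

def correct_bracket (brackets : String) : String :=
  String.ofList (correctA brackets.toList)

-- ===== PORT B =====
structure BState where
  pre : List (List Char)
  suf : List (List Char)
  seg : List Char
  ins : Char
  bal : Int
  valid : Bool
  g : Int
deriving Repr, DecidableEq

def flipB (xs : List Char) : List Char := xs.map (fun c => if c = '(' then ')' else '(')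

-- _flush: append the finished segment's pieces to pre / suf
def flushB (pre suf : List (List Char)) (seg : List Char) (valid : Bool) :
    List (List Char) × List (List Char) :=
  if valid then (pre ++ [seg], suf)
  else (pre ++ [['(']], suf ++ [')' :: flipB ((seg.drop 1).dropLast)])

-- first statement of B's loop body: flush the finished segment, if any
def stepB1 (S : BState) : BState :=
  if S.seg ≠ [] ∧ S.bal = 0 then
    let ps := flushB S.pre S.suf S.seg S.valid
    { S with pre := ps.1, suf := ps.2, seg := ([] : List Char) }
  else S

-- one iteration of B's `for c in brackets` loop
def stepB (S : BState) (c : Char) : BState :=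
  let S' := stepB1 S
  if S'.seg = [] then
    { S' with seg := [c], ins := if c = '(' then '(' else ')', bal := 1,
              valid := c != ')', g := 1 }
  else
    { S' with seg := S'.seg ++ [c],
              bal := S'.bal + (if c = S'.ins then 1 else -1),
              valid := if S'.valid then
                         (if c = '(' then S'.valid else if S'.g = 0 then false else S'.valid)
                       else S'.valid,
              g := if S'.valid then
                     (if c = '(' then S'.g + 1 else if S'.g = 0 then S'.g else S'.g - 1)
                   else S'.g }

def correct_bracket_alt (brackets : String) : String :=
  let S0 : BState := ⟨[], [], [], '(', 0, true, 0⟩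
  let S := brackets.toList.foldl stepB S0
  let ps := if S.seg ≠ [] then flushB S.pre S.suf S.seg S.valid else (S.pre, S.suf)
  String.ofList (ps.1.flatten ++ ps.2.reverse.flatten)

-- ===== PRECONDITION & SPEC =====
def Spec_correct_bracket (brackets : String) (out : String) : Prop := out = correct_bracket_alt brackets
instance (brackets : String) (out : String) : Decidable (Spec_correct_bracket brackets out) := by unfold Spec_correct_bracket; infer_instance

-- ===== CLAIM (what is proved, stated in full; the proofs are below) =====
def Claim_equal_correct_bracket : Prop := ∀ (brackets : String), Dom_correct_bracket brackets → Spec_correct_bracket brackets (correct_bracket brackets)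

-- ===== LEMMAS AND PROOFS =====

-- proof-only helpers: abstract descriptions of B's loop state

def insOf (c0 : Char) : Char := if c0 = '(' then '(' else ')'

def balF (ins : Char) (t : List Char) : Int :=
  match t with
  | [] => 0
  | c :: r => (if c = ins then 1 else -1) + balF ins r

def vstep (s : Bool × Int) (c : Char) : Bool × Int :=
  if s.1 then
    if c = '(' then (s.1, s.2 + 1)
    else if s.2 = 0 then (false, s.2)
    else (s.1, s.2 - 1)
  else s

def vrun (c0 : Char) (t : List Char) : Bool × Int := t.foldl vstep (c0 != ')', 1)

def stFor (pre suf : List (List Char)) (c0 : Char) (t : List Char) : BState :=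
  { pre := pre, suf := suf, seg := c0 :: t, ins := insOf c0,
    bal := 1 + balF (insOf c0) t, valid := (vrun c0 t).1, g := (vrun c0 t).2 }

-- first index at which the balance (starting at b) hits 0, capped at the list length
def idx0 (ins : Char) (b : Int) (t : List Char) : Nat :=
  match t with
  | [] => 0
  | c :: r => if b = 0 then 0 else 1 + idx0 ins (b + (if c = ins then 1 else -1)) r

theorem balF_append_one (ins : Char) (t : List Char) (c : Char) :
    balF ins (t ++ [c]) = balF ins t + (if c = ins then 1 else -1) := by
  induction t with
  | nil => simp [balF]
  | cons d r ih => simp [balF, ih]; omega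

theorem splitLoop_idx0 (rest : List Char) (i : Nat) (ins : Char) (stack : List Char) :
    splitLoopA rest i ins stack = i + idx0 ins (stack.length : Int) rest := by
  induction rest generalizing i stack with
  | nil => simp [splitLoopA, idx0]
  | cons c r ih =>
    cases stack with
    | nil => simp [splitLoopA, idx0]
    | cons a st =>
      have hlen : (((a :: st).length : Int)) ≠ 0 := by
        simp only [List.length_cons]; push_cast; omega
      simp only [splitLoopA, idx0]
      rw [if_neg (by simp), if_neg hlen]
      by_cases hc : c = ins
      · rw [if_pos hc, if_pos hc, ih]
        have hcast : (((c :: a :: st).length : Int)) = ((a :: st).length : Int) + 1 := by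
          simp only [List.length_cons]; push_cast; ring
        rw [hcast]; omega
      · rw [if_neg hc, if_neg hc, ih]
        have hcast : (((a :: st).tail.length : Int)) = ((a :: st).length : Int) + -1 := by
          simp only [List.tail_cons, List.length_cons]; push_cast; ring
        rw [hcast]; omega

theorem idx0_le (ins : Char) (b : Int) (t : List Char) : idx0 ins b t ≤ t.length := by
  induction t generalizing b with
  | nil => simp [idx0]
  | cons c r ih =>
    simp only [idx0, List.length_cons]
    split
    · omega
    · have := ih (b + (if c = ins then 1 else -1))
      omega

theorem idx0_pos_prefix (ins : Char) (t : List Char) (b : Int) (hb : b ≠ 0) :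
    ∀ j < idx0 ins b t, b + balF ins (t.take j) ≠ 0 := by
  induction t generalizing b with
  | nil => intro j hj; simp [idx0] at hj
  | cons c r ih =>
    intro j hj
    simp only [idx0, if_neg hb] at hj
    cases j with
    | zero => simpa [balF] using hb
    | succ j' =>
      have hj' : j' < idx0 ins (b + (if c = ins then 1 else -1)) r := by omega
      by_cases hz : b + (if c = ins then 1 else -1) = 0
      · rw [hz] at hj'
        cases r with
        | nil => simp [idx0] at hj'
        | cons d s => simp [idx0] at hj'
      · have := ih (b + (if c = ins then 1 else -1)) hz j' hj'
        simp only [List.take_succ_cons, balF]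
        omega

theorem idx0_zero_at (ins : Char) (t : List Char) (b : Int) (hb : b ≠ 0)
    (h : idx0 ins b t < t.length) : b + balF ins (t.take (idx0 ins b t)) = 0 := by
  induction t generalizing b with
  | nil => simp [idx0] at h
  | cons c r ih =>
    simp only [idx0, if_neg hb, List.length_cons] at h ⊢
    by_cases hz : b + (if c = ins then 1 else -1) = 0
    · have h0 : idx0 ins (b + (if c = ins then 1 else -1)) r = 0 := by
        rw [hz]; cases r <;> simp [idx0]
      rw [h0]
      simpa [balF] using hz
    · have h' : idx0 ins (b + (if c = ins then 1 else -1)) r < r.length := by omega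
      have := ih (b + (if c = ins then 1 else -1)) hz h'
      rw [Nat.add_comm 1]
      simp only [List.take_succ_cons, balF]
      omega

theorem vrun_false (g : Int) (t : List Char) : t.foldl vstep (false, g) = (false, g) := by
  induction t with
  | nil => rfl
  | cons c r ih => simpa [vstep] using ih

theorem checkLoop_vrun (t : List Char) (stack : List Char) :
    checkLoopA t stack = (t.foldl vstep (true, (stack.length : Int))).1 := by
  induction t generalizing stack with
  | nil => simp [checkLoopA]
  | cons c r ih =>
    simp only [checkLoopA, List.foldl_cons]
    by_cases hc : c = '('
    · rw [if_pos hc]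
      have : vstep (true, (stack.length : Int)) c = (true, (stack.length : Int) + 1) := by
        simp [vstep, hc]
      rw [this, ih ('(' :: stack)]
      simp
    · rw [if_neg hc]
      cases stack with
      | nil =>
        have hv : vstep (true, ((([] : List Char).length : Nat) : Int)) c = (false, 0) := by
          simp [vstep, hc]
        rw [hv, vrun_false]
      | cons a st =>
        have hg : ¬((a :: st).length : Int) = 0 := by
          simp only [List.length_cons]; push_cast; omega
        have hv : vstep (true, ((a :: st).length : Int)) c = (true, (st.length : Int)) := by
          simp only [vstep, if_neg hc, if_neg hg]
          simp only [List.length_cons]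
          norm_num
        rw [hv]
        simpa using ih st

theorem checkValid_vrun (c0 : Char) (t : List Char) :
    checkValidA (c0 :: t) = (vrun c0 t).1 := by
  simp only [checkValidA, vrun]
  by_cases h : c0 = ')'
  · rw [if_pos h]
    have : (c0 != ')') = false := by simp [h]
    rw [this, vrun_false]
  · rw [if_neg h]
    have : (c0 != ')') = true := by simp [h]
    rw [this]
    simpa using checkLoop_vrun t [c0]

theorem flipA_eq_flipB (xs : List Char) : flipA xs = flipB xs := by
  induction xs with
  | nil => rfl
  | cons c r ih => simp [flipA, flipB] at *; exact ih

-- stepping from an empty-segment state starts a fresh segment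
theorem stepB1_id (S : BState) (h : ¬(S.seg ≠ [] ∧ S.bal = 0)) : stepB1 S = S := by
  unfold stepB1
  rw [if_neg h]

theorem stepB_fresh (S : BState) (h : S.seg = []) (c : Char) :
    stepB S c = stFor S.pre S.suf c [] := by
  unfold stepB
  rw [stepB1_id S (by simp [h])]
  rw [if_pos h]
  simp [stFor, vrun, insOf, balF]

-- the inline valid/g update of stepB is vstep
theorem vstep_eq (s : Bool × Int) (c : Char) :
    vstep s c
      = (if s.1 then (if c = '(' then s.1 else if s.2 = 0 then false else s.1) else s.1,
         if s.1 then (if c = '(' then s.2 + 1 else if s.2 = 0 then s.2 else s.2 - 1) else s.2) := by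
  by_cases hv : s.1 <;> by_cases hc : c = '(' <;> by_cases hg : s.2 = 0 <;>
    simp [vstep, hv, hc, hg, Prod.ext_iff]

-- stepping inside a segment (balance nonzero): extend the segment
theorem stepB_extend (pre suf : List (List Char)) (c0 : Char) (t : List Char) (c : Char)
    (h : 1 + balF (insOf c0) t ≠ 0) :
    stepB (stFor pre suf c0 t) c = stFor pre suf c0 (t ++ [c]) := by
  unfold stepB
  rw [stepB1_id _ (fun hco => h hco.2)]
  rw [if_neg (by simp [stFor])]
  have hv : vrun c0 (t ++ [c]) = vstep (vrun c0 t) c := by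
    simp [vrun, List.foldl_append]
  simp only [stFor, hv]
  simp only [BState.mk.injEq]
  and_intros
  · trivial
  · trivial
  · simp
  · trivial
  · rw [balF_append_one]; ring_nf
  · rw [vstep_eq]
  · rw [vstep_eq]

-- running B over a segment tail with no internal zero balance
theorem run_seg (c0 : Char) :
    ∀ (rest t : List Char) (pre suf : List (List Char)),
    (∀ j ≤ rest.length, j ≥ 1 → 1 + balF (insOf c0) (t ++ rest.take (j-1)) ≠ 0) →
    rest.foldl stepB (stFor pre suf c0 t) = stFor pre suf c0 (t ++ rest) := by
  intro rest
  induction rest with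
  | nil => intro t pre suf _; simp
  | cons c r ih =>
    intro t pre suf H
    have hbal : 1 + balF (insOf c0) t ≠ 0 := by
      have := H 1 (by simp) (by omega)
      simpa using this
    simp only [List.foldl_cons]
    rw [stepB_extend pre suf c0 t c hbal]
    rw [ih (t ++ [c]) pre suf ?_]
    · simp
    · intro j hj hj1
      cases j with
      | zero => omega
      | succ j' =>
        have := H (j' + 2) (by simp at hj ⊢; omega) (by omega)
        simpa [List.take_succ_cons, List.append_assoc] using this

-- the finalize step of B
def finB (S : BState) : List Char :=
  let ps := if S.seg ≠ [] then flushB S.pre S.suf S.seg S.valid else (S.pre, S.suf)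
  ps.1.flatten ++ ps.2.reverse.flatten

theorem flush_boundary (pre suf : List (List Char)) (c0 : Char) (t : List Char) (c : Char)
    (h : 1 + balF (insOf c0) t = 0) :
    stepB (stFor pre suf c0 t) c
      = stFor (flushB pre suf (c0 :: t) (vrun c0 t).1).1
              (flushB pre suf (c0 :: t) (vrun c0 t).1).2 c [] := by
  unfold stepB
  have h1 : stepB1 (stFor pre suf c0 t)
      = { stFor pre suf c0 t with
          pre := (flushB pre suf (c0 :: t) (vrun c0 t).1).1,
          suf := (flushB pre suf (c0 :: t) (vrun c0 t).1).2,
          seg := ([] : List Char) } := by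
    unfold stepB1
    rw [if_pos ⟨List.cons_ne_nil c0 t, h⟩]
    rfl
  rw [h1, if_pos rfl]
  simp [stFor, vrun, insOf, balF]

theorem correctA_nil : correctA [] = [] := by
  rw [correctA]

theorem correctA_cons (c0 : Char) (t : List Char) :
    correctA (c0 :: t) =
      if checkValidA ((c0 :: t).take (splitIdxA (c0 :: t)))
      then (c0 :: t).take (splitIdxA (c0 :: t)) ++ correctA ((c0 :: t).drop (splitIdxA (c0 :: t)))
      else ('(' :: correctA ((c0 :: t).drop (splitIdxA (c0 :: t)))) ++
           ')' :: flipA ((((c0 :: t).take (splitIdxA (c0 :: t))).drop 1).dropLast) := by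
  rw [correctA]

-- main invariant: B's loop from a fresh state computes A's recursion, bracketed by pre/suf
theorem main_inv : ∀ (n : Nat) (cs : List Char), cs.length ≤ n →
    ∀ (pre suf : List (List Char)),
    finB (cs.foldl stepB ⟨pre, suf, [], '(', 0, true, 0⟩)
      = pre.flatten ++ correctA cs ++ suf.reverse.flatten := by
  intro n
  induction n with
  | zero =>
    intro cs hcs pre suf
    have hnil : cs = [] := by
      cases cs
      · rfl
      · simp at hcs
    subst hnil
    simp [finB, correctA_nil]
  | succ n ih =>
    intro cs hcs pre suf
    cases cs with
    | nil => simp [finB, correctA_nil]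
    | cons c0 t =>
      have hfresh : stepB (⟨pre, suf, [], '(', 0, true, 0⟩ : BState) c0
          = stFor pre suf c0 [] := stepB_fresh _ rfl c0
      set ins := insOf c0 with hins
      set m := idx0 ins 1 t with hm
      have hmle : m ≤ t.length := idx0_le ins 1 t
      have hk : splitIdxA (c0 :: t) = 1 + m := by
        simp only [splitIdxA, splitLoop_idx0]
        rfl
      have hpre : ∀ j ≤ (t.take m).length, j ≥ 1 →
          1 + balF ins ([] ++ (t.take m).take (j-1)) ≠ 0 := by
        intro j hj hj1
        have hjm : j - 1 < m := by
          rw [List.length_take] at hj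
          omega
        have h2 := idx0_pos_prefix ins t 1 (by norm_num) (j-1) hjm
        have h3 : (t.take m).take (j-1) = t.take (j-1) := by
          rw [List.take_take]
          congr 1
          omega
        simpa [h3] using h2
      have hfold : (c0 :: t).foldl stepB (⟨pre, suf, [], '(', 0, true, 0⟩ : BState)
          = (t.drop m).foldl stepB (stFor pre suf c0 (t.take m)) := by
        conv_lhs => rw [show (c0 :: t) = c0 :: (t.take m ++ t.drop m) by
          rw [List.take_append_drop]]
        simp only [List.foldl_cons, List.foldl_append, hfresh]
        rw [run_seg c0 (t.take m) [] pre suf hpre]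
        simp
      have h1 : (c0 :: t).take (splitIdxA (c0 :: t)) = c0 :: t.take m := by
        rw [hk, Nat.add_comm]
        simp [List.take_succ_cons]
      have h2 : (c0 :: t).drop (splitIdxA (c0 :: t)) = t.drop m := by
        rw [hk, Nat.add_comm]
        simp [List.drop_succ_cons]
      cases hdrop : t.drop m with
      | nil =>
        have htm : t.take m = t := by
          have hdl : (List.drop m t).length = t.length - m := List.length_drop
          rw [hdrop] at hdl
          simp only [List.length_nil] at hdl
          have : m = t.length := by omega
          simp [this]
        rw [hfold, hdrop]
        simp only [List.foldl_nil]
        simp only [finB, stFor]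
        rw [if_pos (by simp)]
        rw [correctA_cons c0 t, h1, h2, hdrop, htm]
        rw [← checkValid_vrun c0 t]
        by_cases hcv : checkValidA (c0 :: t) = true
        · simp [flushB, hcv, correctA_nil]
        · have hfv : checkValidA (c0 :: t) = false := by simpa using hcv
          simp [flushB, hfv, correctA_nil, flipA_eq_flipB]
      | cons c1 v' =>
        have hmlt : m < t.length := by
          by_contra hge
          have hd0 : t.drop m = [] := List.drop_eq_nil_of_le (by omega)
          rw [hd0] at hdrop
          simp at hdrop
        have hzero : 1 + balF ins (t.take m) = 0 := idx0_zero_at ins t 1 (by norm_num) hmlt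
        rw [hfold, hdrop]
        simp only [List.foldl_cons]
        rw [flush_boundary pre suf c0 (t.take m) c1 hzero]
        have hfb : stepB (⟨(flushB pre suf (c0 :: t.take m) (vrun c0 (t.take m)).1).1,
                           (flushB pre suf (c0 :: t.take m) (vrun c0 (t.take m)).1).2,
                           [], '(', 0, true, 0⟩ : BState) c1
            = stFor (flushB pre suf (c0 :: t.take m) (vrun c0 (t.take m)).1).1
                    (flushB pre suf (c0 :: t.take m) (vrun c0 (t.take m)).1).2 c1 [] :=
          stepB_fresh _ rfl c1
        rw [← hfb]
        rw [show ∀ S : BState, v'.foldl stepB (stepB S c1) = (c1 :: v').foldl stepB S from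
          fun S => by simp]
        have hlen2 : (c1 :: v').length ≤ n := by
          have hdl : (List.drop m t).length = t.length - m := List.length_drop
          rw [hdrop] at hdl
          simp only [List.length_cons] at hdl hcs ⊢
          omega
        rw [ih (c1 :: v') hlen2]
        rw [← hdrop]
        rw [correctA_cons c0 t, h1, h2]
        rw [← checkValid_vrun c0 (t.take m)]
        by_cases hcv : checkValidA (c0 :: t.take m) = true
        · simp [flushB, hcv]
        · have hfv : checkValidA (c0 :: t.take m) = false := by simpa using hcv
          simp [flushB, hfv, flipA_eq_flipB]

-- ===== VERDICT (by name: the statement is the Claim_ definition above) =====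
theorem correct_bracket_spec : Claim_equal_correct_bracket := by
  intro brackets _
  unfold Spec_correct_bracket correct_bracket correct_bracket_alt
  have hmain := main_inv brackets.toList.length brackets.toList (le_refl _) [] []
  simp only [finB, List.flatten_nil, List.reverse_nil, List.append_nil,
    List.nil_append] at hmain
  exact congrArg String.ofList hmain.symm
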